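-- pv_equiv track=rewrite | github.com/zycdengdeng/proj_utils_pro_Roadside_Generation | intersection_filter/query_vehicle_in_region.py | find_continuous_segments
-- ===== SOURCE A (Python) =====
-- def find_continuous_segments(frames_in_region, label_files_ts):
--     """
--     找出连续的在区域内的片段（考虑中间可能短暂离开区域又回来的情况）
--
--     Returns:
--         segments: [(start_ts, end_ts, frame_count, all_timestamps), ...]
--     """
--     if not frames_in_region:
--         return []
--
--     # 按时间顺序排列所有在区域内的时间戳
--     all_ts = sorted(set(f[0] for f in frames_in_region))
--
--     # 按间隔 >500ms 切分为连续片段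
--     segments = []
--     current_ts_list = [all_ts[0]]
--
--     for i in range(1, len(all_ts)):
--         if all_ts[i] - all_ts[i - 1] > 500:
--             segments.append((current_ts_list[0], current_ts_list[-1],
--                              len(current_ts_list), current_ts_list))
--             current_ts_list = [all_ts[i]]
--         else:
--             current_ts_list.append(all_ts[i])
--
--     segments.append((current_ts_list[0], current_ts_list[-1],
--                      len(current_ts_list), current_ts_list))
--
--     return segments
-- ===== SOURCE B (Python) =====
-- def find_continuous_segments(frames_in_region, label_files_ts):
--     """Two-pointer re-implementation: take one whole segment at a time
--     (advance j to the segment end, slice), instead of A's element-by-element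
--     accumulator with flush-on-gap."""
--     if not frames_in_region:
--         return []
--
--     all_ts = sorted(set(f[0] for f in frames_in_region))
--
--     segments = []
--     i = 0
--     n = len(all_ts)
--     while i < n:
--         j = i + 1
--         while j < n and all_ts[j] - all_ts[j - 1] <= 500:
--             j += 1
--         chunk = all_ts[i:j]
--         segments.append((chunk[0], chunk[-1], len(chunk), chunk))
--         i = j
--     return segments
-- ===== Notes on version B (the rewrite author's own statement) =====
-- stated objective: alternative
-- what changed: Replaces A's element-by-element accumulator list that is flushed whenever a >500 gap appears by a two-pointer scan that finds each segment's end index first and then emits the whole segment as one slice.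
import Mathlib
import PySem

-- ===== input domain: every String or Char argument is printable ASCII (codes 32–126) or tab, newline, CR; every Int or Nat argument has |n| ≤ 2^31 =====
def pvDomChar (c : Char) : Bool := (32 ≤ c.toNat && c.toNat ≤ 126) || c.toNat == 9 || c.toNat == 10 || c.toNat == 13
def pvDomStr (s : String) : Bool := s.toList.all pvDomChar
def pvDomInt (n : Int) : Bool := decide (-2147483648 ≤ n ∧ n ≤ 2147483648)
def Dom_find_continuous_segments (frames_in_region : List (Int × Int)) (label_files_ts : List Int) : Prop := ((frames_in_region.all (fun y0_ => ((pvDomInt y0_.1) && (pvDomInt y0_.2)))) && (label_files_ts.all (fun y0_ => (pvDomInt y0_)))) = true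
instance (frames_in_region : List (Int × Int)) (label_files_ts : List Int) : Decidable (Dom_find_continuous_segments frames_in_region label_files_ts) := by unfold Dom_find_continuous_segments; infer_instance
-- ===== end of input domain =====

-- B replaces A's element-by-element accumulator (flushed at each >500 gap) by a
-- two-pointer scan that takes one whole segment at a time; same cost, different structure.


-- ===== PORT A =====
-- the 'for i in range(1, len(all_ts))' loop: walks the tail of all_ts carrying
-- prev = all_ts[i-1]; state (segments, current_ts_list) exactly as in A
def pvALoop (segments : List (Int × Int × Int × List Int)) (cur : List Int) (prev : Int) :
    List Int → (List (Int × Int × Int × List Int) × List Int)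
  | [] => (segments, cur)
  | t :: rest =>
    if t - prev > 500 then pvALoop (segments ++ [(PySem.List.pyGetD cur 0 0, PySem.List.pyGetD cur (-1) 0, (cur.length : Int), cur)]) [t] t rest
    else pvALoop segments (cur ++ [t]) t rest

def find_continuous_segments (frames_in_region : List (Int × Int)) (label_files_ts : List Int) :
    List (Int × Int × Int × List Int) :=
  if frames_in_region = [] then []
  else
    match PySem.List.sorted (PySem.Set.ofList (frames_in_region.map (fun f => f.1))) (fun x => x) false with
    | [] => []  -- unreachable: frames_in_region ≠ [] makes all_ts nonempty
    | x :: xs =>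
      let st := pvALoop [] [x] x xs
      -- pyGetD with default 0 is exact here: current_ts_list is never empty
      st.1 ++ [(PySem.List.pyGetD st.2 0 0, PySem.List.pyGetD st.2 (-1) 0, (st.2.length : Int), st.2)]

-- ===== PORT B =====
def pvMkB (chunk : List Int) : Int × Int × Int × List Int :=
  (PySem.List.pyGetD chunk 0 0, PySem.List.pyGetD chunk (-1) 0, (chunk.length : Int), chunk)

-- inner while loop of B: from position i+1 advance j while the gap stays ≤ 500;
-- returns (all_ts[i+1:j], all_ts[j:]) — the rest of the current chunk and the remainder
def pvRun (prev : Int) : List Int → (List Int × List Int)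
  | [] => ([], [])
  | t :: ts => if t - prev ≤ 500 then let p := pvRun t ts; (t :: p.1, p.2) else ([], t :: ts)

theorem pvRun_len (ts : List Int) (prev : Int) : (pvRun prev ts).2.length ≤ ts.length := by
  induction ts generalizing prev with
  | nil => simp [pvRun]
  | cons t ts ih =>
    simp only [pvRun]
    split
    · exact le_trans (ih t) (Nat.le_succ _)
    · simp

-- outer while loop of B: emit one whole chunk per iteration
def pvChunks : List Int → List (List Int)
  | [] => []
  | x :: xs => (x :: (pvRun x xs).1) :: pvChunks (pvRun x xs).2
  termination_by l => l.length
  decreasing_by simpa using Nat.lt_succ_of_le (pvRun_len xs x)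

def find_continuous_segments_alt (frames_in_region : List (Int × Int)) (label_files_ts : List Int) :
    List (Int × Int × Int × List Int) :=
  if frames_in_region = [] then []
  else
    (pvChunks (PySem.List.sorted (PySem.Set.ofList (frames_in_region.map (fun f => f.1))) (fun x => x) false)).map pvMkB

-- ===== PRECONDITION & SPEC =====
def Spec_find_continuous_segments (frames_in_region : List (Int × Int)) (label_files_ts : List Int) (out : List (Int × Int × Int × List Int)) : Prop := out = find_continuous_segments_alt frames_in_region label_files_ts
instance (frames_in_region : List (Int × Int)) (label_files_ts : List Int) (out : List (Int × Int × Int × List Int)) : Decidable (Spec_find_continuous_segments frames_in_region label_files_ts out) := by unfold Spec_find_continuous_segments; infer_instance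

-- ===== CLAIM (what is proved, stated in full; the proofs are below) =====
def Claim_equal_find_continuous_segments : Prop := ∀ (frames_in_region : List (Int × Int)) (label_files_ts : List Int), Dom_find_continuous_segments frames_in_region label_files_ts → Spec_find_continuous_segments frames_in_region label_files_ts (find_continuous_segments frames_in_region label_files_ts)

-- ===== LEMMAS AND PROOFS =====
-- A's flush-on-gap loop produces exactly B's chunk list, segment by segment
theorem pvALoop_eq (rest : List Int) :
    ∀ (segs : List (Int × Int × Int × List Int)) (cur : List Int) (prev : Int),
      (pvALoop segs cur prev rest).1
          ++ [(PySem.List.pyGetD (pvALoop segs cur prev rest).2 0 0,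
               PySem.List.pyGetD (pvALoop segs cur prev rest).2 (-1) 0,
               ((pvALoop segs cur prev rest).2.length : Int), (pvALoop segs cur prev rest).2)]
        = segs ++ ((cur ++ (pvRun prev rest).1) :: pvChunks (pvRun prev rest).2).map pvMkB := by
  induction rest with
  | nil => intro segs cur prev; simp [pvALoop, pvRun, pvChunks, pvMkB]
  | cons t ts ih =>
    intro segs cur prev
    by_cases h : t - prev > 500
    · have h' : ¬ (t - prev ≤ 500) := by omega
      simp only [pvALoop, pvRun, if_pos h, if_neg h']
      rw [ih]
      rw [pvChunks]
      simp [pvMkB]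
    · have h' : t - prev ≤ 500 := by omega
      simp only [pvALoop, pvRun, if_neg h, if_pos h']
      rw [ih]
      simp

-- ===== VERDICT (by name: the statement is the Claim_ definition above) =====
theorem find_continuous_segments_spec : Claim_equal_find_continuous_segments := by
  intro frames label _
  unfold Spec_find_continuous_segments find_continuous_segments find_continuous_segments_alt
  by_cases h : frames = []
  · simp [h]
  · simp only [if_neg h]
    cases hts : PySem.List.sorted (PySem.Set.ofList (frames.map (fun f => f.1))) (fun x => x) false with
    | nil => simp [pvChunks]
    | cons x xs =>
      rw [pvChunks]
      simpa using pvALoop_eq xs [] [x] x
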